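-- pv_equiv track=rewrite | github.com/desaiparv5/EPI-Solutions | dynamic_programming/traverse_2d_array.py | traverse_2d_array_5
-- ===== SOURCE A (Python) =====
-- def traverse_2d_array_5(k):
--     # A decimal number is a sequence of digits, i.e., a sequence over {0,1,2, . . . ,9}. The sequence
--     # has to be of length 1 or more, and the first element in the sequence cannot be 0. Call a decimal
--     # number D monotone if D[i] <= D[i+1], 0 < i < |D|. Write a program which takes as input a positive
--     # integer k and computes the number of decimal numbers of length k that are monotone
--     digits = 9
--     dp = [[0]*digits for _ in range(k)]
--     dp[0][0] = 1
--     for col in range(1, digits):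
--         dp[0][col] = 1 + dp[0][col-1]
--     for row in range(1, k):
--         dp[row][0] = dp[row-1][0]
--
--     for col in range(1, digits):
--         for row in range(1, k):
--             dp[row][col] = dp[row-1][col] + dp[row][col-1]
--     return dp[-1][-1]
-- ===== SOURCE B (Python) =====
-- def traverse_2d_array_5(k):
--     # closed form: C(k+8, 8) computed as an exact incremental product
--     num = 1
--     for i in range(1, 9):
--         num = num * (k + i) // i
--     return num
-- ===== Notes on version B (the rewrite author's own statement) =====
-- stated objective: faster
-- what changed: Replaces the k-row dynamic-programming table with the closed-form binomial coefficient C(k+8,8), computed by an 8-step exact incremental product.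
-- outside the precondition, e.g. on traverse_2d_array_5(0): A raises IndexError, B returns 1
import Mathlib
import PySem

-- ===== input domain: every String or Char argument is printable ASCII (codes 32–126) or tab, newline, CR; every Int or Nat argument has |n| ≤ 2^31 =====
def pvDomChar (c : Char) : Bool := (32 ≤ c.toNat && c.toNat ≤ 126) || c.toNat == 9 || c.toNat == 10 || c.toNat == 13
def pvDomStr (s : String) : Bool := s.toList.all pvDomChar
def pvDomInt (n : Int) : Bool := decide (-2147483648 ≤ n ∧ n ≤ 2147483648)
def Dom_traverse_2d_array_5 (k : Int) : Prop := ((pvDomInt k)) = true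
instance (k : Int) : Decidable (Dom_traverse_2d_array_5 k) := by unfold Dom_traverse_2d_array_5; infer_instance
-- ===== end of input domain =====

-- B replaces A's O(k) dynamic-programming table with the closed-form binomial C(k+8,8)
-- computed by an 8-step exact incremental product (objective: faster).

-- ===== PORT A =====
-- dp is a Python list of lists; ported with Array for list semantics with O(1) update.
-- dp[i] / dp[i][j] reads, with Python's negative indexing (used only by the final dp[-1][-1]).
def pvGetRow (dp : Array (Array Int)) (i : Int) : Array Int :=
  let j := if i < 0 then i + (dp.size : Int) else i
  if 0 ≤ j then (dp[j.toNat]?).getD #[] else #[]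

def pvGetCell (dp : Array (Array Int)) (i j : Int) : Int :=
  let row := pvGetRow dp i
  let jj := if j < 0 then j + (row.size : Int) else j
  if 0 ≤ jj then (row[jj.toNat]?).getD 0 else 0

-- dp[i][j] = v ; every written index in A is a nonnegative in-range loop variable, so .toNat is
-- exact here.  Python raises IndexError on the write dp[0][0] = 1 when k ≤ 0 (dp is empty);
-- Pre_ excludes that, so the total no-op behaviour of modify/setIfInBounds out of range is
-- never reached under the claim.
def pvSetCell (dp : Array (Array Int)) (i j : Int) (v : Int) : Array (Array Int) :=
  dp.modify i.toNat (fun row => row.setIfInBounds j.toNat v)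

def traverse_2d_array_5 (k : Int) : Int :=
  let digits : Int := 9
  let dp : Array (Array Int) :=
    ((PySem.List.pyRange 0 k 1).map (fun _ => (List.replicate 9 (0 : Int)).toArray)).toArray
  let dp := pvSetCell dp 0 0 1
  let dp := (PySem.List.pyRange 1 digits 1).foldl
      (fun dp col => pvSetCell dp 0 col (1 + pvGetCell dp 0 (col - 1))) dp
  let dp := (PySem.List.pyRange 1 k 1).foldl
      (fun dp row => pvSetCell dp row 0 (pvGetCell dp (row - 1) 0)) dp
  let dp := (PySem.List.pyRange 1 digits 1).foldl (fun dp col =>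
      (PySem.List.pyRange 1 k 1).foldl
        (fun dp row =>
          pvSetCell dp row col (pvGetCell dp (row - 1) col + pvGetCell dp row (col - 1))) dp) dp
  pvGetCell dp (-1) (-1)

-- ===== PORT B =====
def traverse_2d_array_5_alt (k : Int) : Int :=
  (PySem.List.pyRange 1 9 1).foldl (fun num i => PySem.Int.floordiv (num * (k + i)) i) 1

-- ===== PRECONDITION & SPEC =====
-- Pre_ excludes k ≤ 0, on which Python A raises IndexError (dp is empty, so dp[0][0] = 1 fails).
def Pre_traverse_2d_array_5 (k : Int) : Prop := 1 ≤ k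
instance (k : Int) : Decidable (Pre_traverse_2d_array_5 k) := by
  unfold Pre_traverse_2d_array_5; infer_instance

def pvWitness_traverse_2d_array_5 : Int := 3

def Spec_traverse_2d_array_5 (k : Int) (out : Int) : Prop := out = traverse_2d_array_5_alt k
instance (k : Int) (out : Int) : Decidable (Spec_traverse_2d_array_5 k out) := by
  unfold Spec_traverse_2d_array_5; infer_instance

-- ===== CLAIM (what is proved, stated in full; the proofs are below) =====
def Claim_equal_traverse_2d_array_5 : Prop :=
  ∀ (k : Int), Dom_traverse_2d_array_5 k → Pre_traverse_2d_array_5 k →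
    Spec_traverse_2d_array_5 k (traverse_2d_array_5 k)

-- ===== LEMMAS AND PROOFS =====

-- the ideal table entry: dp[r][c] = C(r+c+1, c)
def pvC (r c : Nat) : Int := (Nat.choose (r + c + 1) c : Int)

-- A's dp as a map over index ranges
def pvTbl (N : Nat) (f : Nat → Nat → Int) : Array (Array Int) :=
  ((List.range N).map (fun r => ((List.range 9).map (fun c => f r c)).toArray)).toArray

lemma pvTbl_size (N : Nat) (f : Nat → Nat → Int) : (pvTbl N f).size = N := by simp [pvTbl]

lemma pvTbl_getElem (N : Nat) (f : Nat → Nat → Int) (r : Nat) (h : r < (pvTbl N f).size) :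
    (pvTbl N f)[r] = ((List.range 9).map (fun c => f r c)).toArray := by
  have hr : r < N := by simpa [pvTbl] using h
  simp [pvTbl, hr]

lemma pvTbl_congr (N : Nat) (f g : Nat → Nat → Int)
    (h : ∀ r, r < N → ∀ c, c < 9 → f r c = g r c) : pvTbl N f = pvTbl N g := by
  unfold pvTbl
  congr 1
  apply List.map_congr_left
  intro r hr
  congr 1
  apply List.map_congr_left
  intro c hc
  exact h r (List.mem_range.mp hr) c (List.mem_range.mp hc)

lemma pvGetRow_tbl (N : Nat) (f : Nat → Nat → Int) (r : Int)
    (hr0 : 0 ≤ r) (hrN : r < (N : Int)) :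
    pvGetRow (pvTbl N f) r = ((List.range 9).map (fun c => f r.toNat c)).toArray := by
  have hrn : r.toNat < (pvTbl N f).size := by rw [pvTbl_size]; omega
  unfold pvGetRow
  rw [if_neg (show ¬ r < 0 by omega), if_pos hr0]
  rw [Array.getElem?_eq_getElem hrn, pvTbl_getElem N f r.toNat hrn]
  rfl

lemma pvGetCell_tbl (N : Nat) (f : Nat → Nat → Int) (r c : Int)
    (hr0 : 0 ≤ r) (hrN : r < (N : Int)) (hc0 : 0 ≤ c) (hc : c < 9) :
    pvGetCell (pvTbl N f) r c = f r.toNat c.toNat := by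
  have hcn : c.toNat < 9 := by omega
  unfold pvGetCell
  rw [pvGetRow_tbl N f r hr0 hrN]
  dsimp only
  rw [if_neg (show ¬ c < 0 by omega), if_pos hc0]
  rw [List.getElem?_toArray]
  simp [hcn]

lemma pvSetCell_tbl (N : Nat) (f : Nat → Nat → Int) (r c : Int) (v : Int)
    (hr0 : 0 ≤ r) (hrN : r < (N : Int)) (hc0 : 0 ≤ c) (hc : c < 9) :
    pvSetCell (pvTbl N f) r c v
      = pvTbl N (fun r' c' => if r' = r.toNat ∧ c' = c.toNat then v else f r' c') := by
  have hrn : r.toNat < N := by omega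
  have hcn : c.toNat < 9 := by omega
  unfold pvSetCell
  apply Array.ext
  · rw [Array.size_modify, pvTbl_size, pvTbl_size]
  · intro i h1 h2
    have hiN : i < N := by simpa [pvTbl_size] using h2
    rw [Array.getElem_modify]
    rw [pvTbl_getElem N _ i h2]
    by_cases hi : r.toNat = i
    · subst hi
      rw [if_pos rfl]
      rw [pvTbl_getElem N f r.toNat (by simpa [pvTbl_size] using hrn)]
      apply Array.ext
      · simp
      · intro j h3 h4
        have hj9 : j < 9 := by simpa using h4
        rw [Array.getElem_setIfInBounds (by simpa using hj9)]
        rw [List.getElem_toArray, List.getElem_toArray]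
        simp only [List.getElem_map, List.getElem_range]
        by_cases hj : c.toNat = j
        · subst hj; simp
        · simp [hj, Ne.symm hj]
    · rw [if_neg hi]
      rw [pvTbl_getElem N f i (by simpa [pvTbl_size] using hiN)]
      congr 1
      apply List.map_congr_left
      intro j hjm
      have hne : ¬ (i = r.toNat ∧ j = c.toNat) := by
        intro hh; exact hi hh.1.symm
      simp [hne]

lemma pvGetCell_tbl_last (N : Nat) (f : Nat → Nat → Int) (hN : 0 < N) :
    pvGetCell (pvTbl N f) (-1) (-1) = f (N - 1) 8 := by
  have hrn : N - 1 < (pvTbl N f).size := by rw [pvTbl_size]; omega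
  have hrow : pvGetRow (pvTbl N f) (-1) = ((List.range 9).map (fun c => f (N - 1) c)).toArray := by
    unfold pvGetRow
    rw [if_pos (show (-1 : Int) < 0 by norm_num), pvTbl_size]
    rw [if_pos (show (0 : Int) ≤ -1 + (N : Int) by omega)]
    have hidx : ((-1 : Int) + (N : Int)).toNat = N - 1 := by omega
    rw [hidx, Array.getElem?_eq_getElem hrn, pvTbl_getElem N f (N - 1) hrn]
    rfl
  unfold pvGetCell
  rw [hrow]
  dsimp only
  have hsz : (((List.range 9).map (fun c => f (N - 1) c)).toArray).size = 9 := by simp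
  rw [hsz]
  rw [if_pos (show (-1 : Int) < 0 by norm_num)]
  rw [if_pos (show (0 : Int) ≤ -1 + ((9 : Nat) : Int) by omega)]
  have hidx : ((-1 : Int) + ((9 : Nat) : Int)).toNat = 8 := by omega
  rw [hidx]
  simp

-- intermediate-state value functions of A's four loops
def pvG (j : Nat) : Nat → Nat → Int := fun r c => if r = 0 ∧ c ≤ j then (c : Int) + 1 else 0
def pvH (i : Nat) : Nat → Nat → Int :=
  fun r c => if r = 0 then (c : Int) + 1 else if c = 0 ∧ r ≤ i then 1 else 0
def pvF (j i : Nat) : Nat → Nat → Int :=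
  fun r c => if r = 0 ∨ c ≤ j ∨ (c = j + 1 ∧ r ≤ i) then pvC r c else 0

-- loop 1 of A (first-row fill), processed columns 1..j
lemma pvLoop2 (N : Nat) (hN : 1 ≤ N) : ∀ j : Nat, j ≤ 8 →
    (PySem.List.pyRange 1 ((j : Int) + 1) 1).foldl
        (fun dp col => pvSetCell dp 0 col (1 + pvGetCell dp 0 (col - 1))) (pvTbl N (pvG 0))
      = pvTbl N (pvG j) := by
  intro j
  induction j with
  | zero =>
    intro _
    have h0 : PySem.List.pyRange 1 (((0 : Nat) : Int) + 1) 1 = [] :=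
      PySem.List.pyRange_one_eq_nil (by omega)
    rw [h0, List.foldl_nil]
  | succ j ih =>
    intro hj
    have hstep : PySem.List.pyRange 1 (((j + 1 : Nat) : Int) + 1) 1
        = PySem.List.pyRange 1 ((j : Int) + 1) 1 ++ [(j : Int) + 1] := by
      have h1 : (((j + 1 : Nat) : Int) + 1) = ((j : Int) + 1) + 1 := by push_cast; ring
      rw [h1, PySem.List.pyRange_one_succ_right (by omega)]
    rw [hstep, List.foldl_append, ih (by omega)]
    simp only [List.foldl_cons, List.foldl_nil]
    have hc1 : ((j : Int) + 1 - 1) = (j : Int) := by ring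
    rw [hc1, pvGetCell_tbl N _ 0 (j : Int) (by omega) (by omega) (by omega) (by omega)]
    rw [pvSetCell_tbl N _ 0 ((j : Int) + 1) _ (by omega) (by omega) (by omega) (by omega)]
    apply pvTbl_congr
    intro r hr c hc
    have ht0 : (0 : Int).toNat = 0 := rfl
    have ht1 : ((j : Int) + 1).toNat = j + 1 := by omega
    have ht2 : ((j : Int)).toNat = j := by omega
    simp only [ht0, ht1, ht2, pvG, true_and, le_refl, if_true]
    split_ifs <;> omega

-- loop 2 of A (column-0 fill), processed rows 1..i
lemma pvLoop3 (N : Nat) (hN : 1 ≤ N) : ∀ i : Nat, i < N →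
    (PySem.List.pyRange 1 ((i : Int) + 1) 1).foldl
        (fun dp row => pvSetCell dp row 0 (pvGetCell dp (row - 1) 0)) (pvTbl N (pvH 0))
      = pvTbl N (pvH i) := by
  intro i
  induction i with
  | zero =>
    intro _
    have h0 : PySem.List.pyRange 1 (((0 : Nat) : Int) + 1) 1 = [] :=
      PySem.List.pyRange_one_eq_nil (by omega)
    rw [h0, List.foldl_nil]
  | succ i ih =>
    intro hi
    have hstep : PySem.List.pyRange 1 (((i + 1 : Nat) : Int) + 1) 1
        = PySem.List.pyRange 1 ((i : Int) + 1) 1 ++ [(i : Int) + 1] := by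
      have h1 : (((i + 1 : Nat) : Int) + 1) = ((i : Int) + 1) + 1 := by push_cast; ring
      rw [h1, PySem.List.pyRange_one_succ_right (by omega)]
    rw [hstep, List.foldl_append, ih (by omega)]
    simp only [List.foldl_cons, List.foldl_nil]
    have hc1 : ((i : Int) + 1 - 1) = (i : Int) := by ring
    rw [hc1, pvGetCell_tbl N _ (i : Int) 0 (by omega) (by omega) (by omega) (by omega)]
    rw [pvSetCell_tbl N _ ((i : Int) + 1) 0 _ (by omega) (by omega) (by omega) (by omega)]
    apply pvTbl_congr
    intro r hr c hc
    have ht0 : (0 : Int).toNat = 0 := rfl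
    have ht1 : ((i : Int) + 1).toNat = i + 1 := by omega
    have ht2 : ((i : Int)).toNat = i := by omega
    simp only [ht0, ht1, ht2, pvH, true_and, le_refl, if_true]
    split_ifs <;> omega

-- one Pascal step on the ideal entries
lemma pvPascal (i j : Nat) : pvC i (j + 1) + pvC (i + 1) j = pvC (i + 1) (j + 1) := by
  simp only [pvC]
  have h1 : i + 1 + (j + 1) + 1 = (i + j + 2) + 1 := by omega
  have h2 : i + (j + 1) + 1 = i + j + 2 := by omega
  have h3 : i + 1 + j + 1 = i + j + 2 := by omega
  rw [h1, h2, h3, Nat.choose_succ_succ' (i + j + 2) j]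
  push_cast; ring

-- pvF is unchanged at cells other than (i+1, j+1) when row i+1 is processed
lemma pvF_succ (j i r c : Nat) (h : ¬(r = i + 1 ∧ c = j + 1)) : pvF j i r c = pvF j (i + 1) r c := by
  unfold pvF
  by_cases h2 : r = 0 ∨ c ≤ j ∨ (c = j + 1 ∧ r ≤ i)
  · rw [if_pos h2, if_pos (by
      rcases h2 with h2 | h2 | h2
      exacts [Or.inl h2, Or.inr (Or.inl h2), Or.inr (Or.inr ⟨h2.1, by omega⟩)])]
  · rw [if_neg h2, if_neg (by
      intro hh
      rcases hh with hh | hh | hh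
      · exact h2 (Or.inl hh)
      · exact h2 (Or.inr (Or.inl hh))
      · exact h2 (Or.inr (Or.inr ⟨hh.1, by omega⟩)))]

-- a fully processed column folds into the next column's starting state
lemma pvF_col (j i r c : Nat) (h : r ≤ i) : pvF j i r c = pvF (j + 1) 0 r c := by
  unfold pvF
  by_cases h2 : r = 0 ∨ c ≤ j ∨ (c = j + 1 ∧ r ≤ i)
  · rw [if_pos h2, if_pos (by
      rcases h2 with h2 | h2 | h2
      exacts [Or.inl h2, Or.inr (Or.inl (by omega)), Or.inr (Or.inl (by omega))])]
  · rw [if_neg h2, if_neg (by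
      intro hh
      rcases hh with hh | hh | hh
      · exact h2 (Or.inl hh)
      · by_cases hcj : c ≤ j
        · exact h2 (Or.inr (Or.inl hcj))
        · exact h2 (Or.inr (Or.inr ⟨by omega, by omega⟩))
      · exact h2 (Or.inl (by omega)))]

-- inner row loop of A's final double loop, at column j+1, processed rows 1..i
lemma pvLoop4inner (N : Nat) (hN : 1 ≤ N) (j : Nat) (hj : j ≤ 7) : ∀ i : Nat, i < N →
    (PySem.List.pyRange 1 ((i : Int) + 1) 1).foldl
        (fun dp row => pvSetCell dp row ((j : Int) + 1)
          (pvGetCell dp (row - 1) ((j : Int) + 1) + pvGetCell dp row ((j : Int) + 1 - 1)))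
        (pvTbl N (pvF j 0))
      = pvTbl N (pvF j i) := by
  intro i
  induction i with
  | zero =>
    intro _
    have h0 : PySem.List.pyRange 1 (((0 : Nat) : Int) + 1) 1 = [] :=
      PySem.List.pyRange_one_eq_nil (by omega)
    rw [h0, List.foldl_nil]
  | succ i ih =>
    intro hi
    have hstep : PySem.List.pyRange 1 (((i + 1 : Nat) : Int) + 1) 1
        = PySem.List.pyRange 1 ((i : Int) + 1) 1 ++ [(i : Int) + 1] := by
      have h1 : (((i + 1 : Nat) : Int) + 1) = ((i : Int) + 1) + 1 := by push_cast; ring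
      rw [h1, PySem.List.pyRange_one_succ_right (by omega)]
    rw [hstep, List.foldl_append, ih (by omega)]
    simp only [List.foldl_cons, List.foldl_nil]
    have hc1 : ((i : Int) + 1 - 1) = (i : Int) := by ring
    have hc2 : ((j : Int) + 1 - 1) = (j : Int) := by ring
    rw [hc1, hc2]
    rw [pvGetCell_tbl N _ (i : Int) ((j : Int) + 1) (by omega) (by omega) (by omega) (by omega)]
    rw [pvGetCell_tbl N _ ((i : Int) + 1) (j : Int) (by omega) (by omega) (by omega) (by omega)]
    rw [pvSetCell_tbl N _ ((i : Int) + 1) ((j : Int) + 1) _ (by omega) (by omega) (by omega) (by omega)]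
    have hti : ((i : Int)).toNat = i := by omega
    have hti1 : ((i : Int) + 1).toNat = i + 1 := by omega
    have htj : ((j : Int)).toNat = j := by omega
    have htj1 : ((j : Int) + 1).toNat = j + 1 := by omega
    have hv1 : pvF j i i (j + 1) = pvC i (j + 1) := by simp [pvF]
    have hv2 : pvF j i (i + 1) j = pvC (i + 1) j := by simp [pvF]
    simp only [hti, hti1, htj, htj1, hv1, hv2]
    apply pvTbl_congr
    intro r hr c hc
    by_cases h1 : r = i + 1 ∧ c = j + 1
    · obtain ⟨h1a, h1b⟩ := h1
      subst h1a; subst h1b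
      have hcnd : i + 1 = i + 1 ∧ j + 1 = j + 1 := ⟨rfl, rfl⟩
      have hF : pvF j (i + 1) (i + 1) (j + 1) = pvC (i + 1) (j + 1) := by simp [pvF]
      rw [if_pos hcnd, hF]
      exact pvPascal i j
    · rw [if_neg h1]
      exact pvF_succ j i r c h1

-- A's final double loop, processed columns 1..j
lemma pvLoop4 (N : Nat) (hN : 1 ≤ N) : ∀ j : Nat, j ≤ 8 →
    (PySem.List.pyRange 1 ((j : Int) + 1) 1).foldl (fun dp col =>
        (PySem.List.pyRange 1 (N : Int) 1).foldl
          (fun dp row =>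
            pvSetCell dp row col (pvGetCell dp (row - 1) col + pvGetCell dp row (col - 1))) dp)
        (pvTbl N (pvF 0 0))
      = pvTbl N (pvF j 0) := by
  intro j
  induction j with
  | zero =>
    intro _
    have h0 : PySem.List.pyRange 1 (((0 : Nat) : Int) + 1) 1 = [] :=
      PySem.List.pyRange_one_eq_nil (by omega)
    rw [h0, List.foldl_nil]
  | succ j ih =>
    intro hj
    have hstep : PySem.List.pyRange 1 (((j + 1 : Nat) : Int) + 1) 1
        = PySem.List.pyRange 1 ((j : Int) + 1) 1 ++ [(j : Int) + 1] := by
      have h1 : (((j + 1 : Nat) : Int) + 1) = ((j : Int) + 1) + 1 := by push_cast; ring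
      rw [h1, PySem.List.pyRange_one_succ_right (by omega)]
    rw [hstep, List.foldl_append, ih (by omega)]
    simp only [List.foldl_cons, List.foldl_nil]
    have hNr : (N : Int) = ((N - 1 : Nat) : Int) + 1 := by omega
    rw [hNr, pvLoop4inner N hN j (by omega) (N - 1) (by omega)]
    apply pvTbl_congr
    intro r hr c hc
    exact pvF_col j (N - 1) r c (by omega)

-- the initial dp and the first write dp[0][0] = 1
lemma pvInit (N : Nat) :
    ((PySem.List.pyRange 0 (N : Int) 1).map (fun _ => (List.replicate 9 (0 : Int)).toArray)).toArray
      = pvTbl N (fun _ _ => 0) := by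
  unfold pvTbl
  congr 1
  rw [PySem.List.pyRange_one, List.map_map]
  have h1 : ((N : Int) - 0).toNat = N := by omega
  rw [h1]
  apply List.map_congr_left
  intro r _
  apply congrArg List.toArray
  simp [List.eq_replicate_iff]

lemma pvFirstWrite (N : Nat) (hN : 1 ≤ N) :
    pvSetCell (pvTbl N (fun _ _ => 0)) 0 0 1 = pvTbl N (pvG 0) := by
  rw [pvSetCell_tbl N _ 0 0 1 (by omega) (by omega) (by omega) (by omega)]
  apply pvTbl_congr
  intro r hr c hc
  simp only [pvG, Int.toNat_zero, true_and, le_refl, if_true, Nat.le_zero]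
  split_ifs <;> omega

-- bridging congruences between loop stages
lemma pvGH (N : Nat) : pvTbl N (pvG 8) = pvTbl N (pvH 0) := by
  apply pvTbl_congr
  intro r hr c hc
  simp only [pvG, pvH, true_and, le_refl, if_true]
  split_ifs <;> omega

lemma pvHF (N : Nat) : pvTbl N (pvH (N - 1)) = pvTbl N (pvF 0 0) := by
  apply pvTbl_congr
  intro r hr c hc
  simp only [pvH, pvF]
  by_cases h1 : r = 0
  · subst h1
    rw [if_pos rfl, if_pos (Or.inl rfl)]
    have : Nat.choose (0 + c + 1) c = c + 1 := by
      rw [Nat.zero_add, Nat.choose_succ_self_right]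
    simp [pvC, this]
  · rw [if_neg h1]
    by_cases h2 : c = 0 ∧ r ≤ N - 1
    · rw [if_pos h2]
      have hcnd : r = 0 ∨ c ≤ 0 ∨ (c = 0 + 1 ∧ r ≤ 0) := Or.inr (Or.inl (by omega))
      rw [if_pos hcnd]
      obtain ⟨h2a, _⟩ := h2
      subst h2a
      simp [pvC, Nat.choose_zero_right]
    · rw [if_neg h2, if_neg]
      intro hh
      rcases hh with hh | hh | hh
      · exact h1 hh
      · exact h2 ⟨by omega, by omega⟩
      · exact h1 (by omega)

-- A computes C(N+8, 8)
lemma pvA_eq (N : Nat) (hN : 1 ≤ N) :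
    traverse_2d_array_5 (N : Int) = (Nat.choose (N + 8) 8 : Int) := by
  simp only [traverse_2d_array_5]
  have h9 : (9 : Int) = ((8 : Nat) : Int) + 1 := by norm_num
  rw [pvInit N, pvFirstWrite N hN]
  rw [h9, pvLoop2 N hN 8 (le_refl 8), pvGH N]
  have hNr : (N : Int) = ((N - 1 : Nat) : Int) + 1 := by omega
  rw [hNr, pvLoop3 N hN (N - 1) (by omega), ← hNr, pvHF N]
  rw [pvLoop4 N hN 8 (le_refl 8)]
  rw [pvGetCell_tbl_last N _ (by omega)]
  have hcnd : N - 1 = 0 ∨ (8 : Nat) ≤ 8 ∨ ((8 : Nat) = 8 + 1 ∧ N - 1 ≤ 0) := Or.inr (Or.inl (le_refl _))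
  simp only [pvF]
  rw [if_pos hcnd]
  have h8 : N - 1 + 8 + 1 = N + 8 := by omega
  simp [pvC, h8]

-- one multiplicative step of B is exact: C(N+i,i)*(N+i+1)//(i+1) = C(N+i+1,i+1)
lemma pvStep (N i : Nat) :
    PySem.Int.floordiv ((Nat.choose (N + i) i : Int) * ((N : Int) + ((i : Int) + 1))) ((i : Int) + 1)
      = (Nat.choose (N + i + 1) (i + 1) : Int) := by
  have h : (N + i + 1) * Nat.choose (N + i) i = Nat.choose (N + i + 1) (i + 1) * (i + 1) :=
    Nat.succ_mul_choose_eq (N + i) i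
  have h2 : (Nat.choose (N + i) i : Int) * ((N : Int) + ((i : Int) + 1))
      = ((Nat.choose (N + i + 1) (i + 1) * (i + 1) : Nat) : Int) := by
    push_cast
    push_cast at h
    linarith [h]
  rw [h2]
  have h3 : ((i : Int) + 1) = (((i + 1 : Nat)) : Int) := by push_cast; ring
  rw [h3, PySem.Int.floordiv_natCast]
  rw [Nat.mul_div_cancel _ (by omega)]

lemma pvAltFold (N : Nat) : ∀ m : Nat,
    (PySem.List.pyRange 1 ((m : Int) + 1) 1).foldl
        (fun num i => PySem.Int.floordiv (num * ((N : Int) + i)) i) 1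
      = (Nat.choose (N + m) m : Int) := by
  intro m
  induction m with
  | zero =>
    have h0 : PySem.List.pyRange 1 (((0 : Nat) : Int) + 1) 1 = [] :=
      PySem.List.pyRange_one_eq_nil (by omega)
    rw [h0]; simp
  | succ m ih =>
    have hstep : PySem.List.pyRange 1 (((m + 1 : Nat) : Int) + 1) 1
        = PySem.List.pyRange 1 ((m : Int) + 1) 1 ++ [(m : Int) + 1] := by
      have h1 : (((m + 1 : Nat) : Int) + 1) = ((m : Int) + 1) + 1 := by push_cast; ring
      rw [h1, PySem.List.pyRange_one_succ_right (by omega)]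
    rw [hstep, List.foldl_append, ih]
    simp only [List.foldl_cons, List.foldl_nil]
    exact pvStep N m

lemma pvAlt_eq (N : Nat) :
    traverse_2d_array_5_alt (N : Int) = (Nat.choose (N + 8) 8 : Int) := by
  unfold traverse_2d_array_5_alt
  have h9 : (9 : Int) = ((8 : Nat) : Int) + 1 := by norm_num
  rw [h9]
  exact pvAltFold N 8

-- ===== VERDICT (by name: the statement is the Claim_ definition above) =====
theorem traverse_2d_array_5_spec : Claim_equal_traverse_2d_array_5 := by
  intro k _hdom hpre
  unfold Spec_traverse_2d_array_5
  have hk1 : (1 : Int) ≤ k := hpre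
  have hk : k = ((k.toNat : Nat) : Int) := by omega
  rw [hk, pvA_eq k.toNat (by omega), pvAlt_eq]
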